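-- pv_equiv track=rewrite | github.com/rometsch/sheep | paramset.py | parameter_lookup_dict
-- ===== SOURCE A (Python) =====
-- from collections import OrderedDict as ODict
--
-- def parameter_lookup_dict(dct):
--     """ Make a dict to lookup where a given parameter is stored. """
--     lt = ODict()
--     for group in dct:
--         for key in dct[group]:
--             if key in lt:
--                 lt[key].append(group)
--             else:
--                 lt[key] = [group]
--     # Finally add the key itself at the end
--     for key in lt:
--         lt[key].append(key)
--     return lt
-- ===== SOURCE B (Python) =====
-- from collections import OrderedDict as ODict
--
-- def parameter_lookup_dict(dct):
--     """ Make a dict to lookup where a given parameter is stored. """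
--     pairs = [(key, group) for group in dct for key in dct[group]]
--     order = list(ODict.fromkeys(key for key, _ in pairs))
--     return ODict((key, [g for k, g in pairs if k == key] + [key])
--                  for key in order)
-- ===== Notes on version B (the rewrite author's own statement) =====
-- stated objective: alternative
-- what changed: A streams over groups, growing each key's group list inside an OrderedDict in place and then appending the key itself in a second pass over the dict; B first flattens the input into an explicit (key, group) pair list, dedups the keys to fix the order, and builds the result in one shot by filtering the pair list per key.
import Mathlib
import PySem

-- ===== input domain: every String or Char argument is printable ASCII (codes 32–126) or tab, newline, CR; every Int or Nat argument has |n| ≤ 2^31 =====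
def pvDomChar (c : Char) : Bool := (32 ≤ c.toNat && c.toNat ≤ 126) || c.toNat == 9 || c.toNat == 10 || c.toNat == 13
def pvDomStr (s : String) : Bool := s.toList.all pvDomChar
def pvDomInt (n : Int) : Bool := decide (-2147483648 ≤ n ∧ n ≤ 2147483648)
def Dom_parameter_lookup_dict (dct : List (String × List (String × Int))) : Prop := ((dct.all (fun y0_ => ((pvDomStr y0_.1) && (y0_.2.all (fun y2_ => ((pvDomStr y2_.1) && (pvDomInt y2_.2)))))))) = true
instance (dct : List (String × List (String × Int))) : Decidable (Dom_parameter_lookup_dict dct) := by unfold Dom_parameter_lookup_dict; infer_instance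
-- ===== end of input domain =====

-- B replaces A's in-place streaming fill of an OrderedDict by flattening the input into an
-- explicit (key, group) pair list, deduping the keys, and filtering the pair list per key;
-- objective: alternative.

-- ===== PORT A =====
-- The Python argument is a dict of dicts; both ports model it with PySem.Dict built from the association lists.
def parameter_lookup_dict (dct : List (String × List (String × Int))) : List (String × List String) :=
  let d : PySem.Dict String (PySem.Dict String Int) :=
    PySem.Dict.ofList (dct.map (fun p => (p.1, PySem.Dict.ofList p.2)))
  let lt : PySem.Dict String (List String) :=
    d.items.foldl (fun lt gp =>
      gp.2.keys.foldl (fun lt key =>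
        if lt.contains key then lt.modify key [] (fun v => v ++ [gp.1])
        else lt.insert key [gp.1]) lt) PySem.Dict.empty
  (lt.keys.foldl (fun lt key => lt.modify key [] (fun v => v ++ [key])) lt).items

-- ===== PORT B =====
def parameter_lookup_dict_alt (dct : List (String × List (String × Int))) : List (String × List String) :=
  let pairs : List (String × String) :=
    (PySem.Dict.ofList dct).items.flatMap (fun gp =>
      (PySem.Dict.ofList gp.2).keys.map (fun key => (key, gp.1)))
  let order : List String := PySem.List.dedup (pairs.map (fun p => p.1))
  order.map (fun key =>
    (key, (pairs.filter (fun p => p.1 == key)).map (fun p => p.2) ++ [key]))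

-- ===== PRECONDITION & SPEC =====
def Spec_parameter_lookup_dict (dct : List (String × List (String × Int))) (out : List (String × List String)) : Prop := out = parameter_lookup_dict_alt dct
instance (dct : List (String × List (String × Int))) (out : List (String × List String)) : Decidable (Spec_parameter_lookup_dict dct out) := by unfold Spec_parameter_lookup_dict; infer_instance

-- ===== CLAIM (what is proved, stated in full; the proofs are below) =====
def Claim_equal_parameter_lookup_dict : Prop := ∀ (dct : List (String × List (String × Int))), Dom_parameter_lookup_dict dct → Spec_parameter_lookup_dict dct (parameter_lookup_dict dct)

-- ===== LEMMAS AND PROOFS =====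

-- the (key, group) stream A's double loop processes, flattened
def pvPairs (gs : List (String × PySem.Dict String Int)) : List (String × String) :=
  gs.flatMap (fun gp => gp.2.keys.map (fun k => (k, gp.1)))

-- Building a dict from value-mapped pairs = mapping the values of the built dict (itemwise).
theorem pv_insert_map {κ ν μ : Type} [BEq κ] [LawfulBEq κ] [DecidableEq κ] (f : ν → μ)
    (d : PySem.Dict κ ν) (e : PySem.Dict κ μ)
    (h : e.items = d.items.map (fun p => (p.1, f p.2))) (k : κ) (v : ν) :
    (e.insert k (f v)).items = ((d.insert k v).items).map (fun p => (p.1, f p.2)) := by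
  have hkeys : e.keys = d.keys := by
    simp only [PySem.Dict.keys, h, List.map_map]
    rfl
  have hk : e.contains k = d.contains k := by
    rw [PySem.Dict.contains_eq_decide_mem_keys, PySem.Dict.contains_eq_decide_mem_keys, hkeys]
  rw [PySem.Dict.items_insert, PySem.Dict.items_insert, hk]
  cases hc : d.contains k with
  | true =>
    simp only [if_true, h, List.map_map]
    apply List.map_congr_left
    intro p _
    by_cases hp : p.1 = k <;> simp [hp]
  | false => simp [h]

theorem pv_ofList_map {κ ν μ : Type} [BEq κ] [LawfulBEq κ] [DecidableEq κ] (f : ν → μ) (l : List (κ × ν)) :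
    (PySem.Dict.ofList (l.map (fun p => (p.1, f p.2)))).items
      = (PySem.Dict.ofList l).items.map (fun p => (p.1, f p.2)) := by
  suffices h : ∀ (d : PySem.Dict κ ν) (e : PySem.Dict κ μ),
      e.items = d.items.map (fun p => (p.1, f p.2)) →
      (e.update (l.map (fun p => (p.1, f p.2)))).items
        = (d.update l).items.map (fun p => (p.1, f p.2)) by
    exact h PySem.Dict.empty PySem.Dict.empty rfl
  induction l with
  | nil => intro d e h; simpa [PySem.Dict.update] using h
  | cons p t ih =>
    intro d e h
    simp only [List.map_cons, PySem.Dict.update, List.foldl_cons] at *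
    exact ih (d.insert p.1 p.2) (e.insert p.1 (f p.2)) (pv_insert_map f d e h p.1 p.2)

-- In a Nodup list, filtering for one element yields it at most once.
theorem pv_filter_beq {α : Type} [BEq α] [LawfulBEq α] (ks : List α) (k : α) (h : ks.Nodup) :
    ks.filter (fun x => x == k) = if k ∈ ks then [k] else [] := by
  induction ks with
  | nil => simp
  | cons x t ih =>
    rw [List.nodup_cons] at h
    by_cases he : x = k
    · subst he
      simp [ih h.2, h.1]
    · simp [he, ih h.2, Ne.symm he]

-- A's streaming double loop is the modify-append fold over the flattened (key, group) pairs.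
theorem pv_aloop (gs : List (String × PySem.Dict String Int)) (lt0 : PySem.Dict String (List String)) :
    gs.foldl (fun lt gp =>
      gp.2.keys.foldl (fun lt key =>
        if lt.contains key then lt.modify key [] (fun v => v ++ [gp.1])
        else lt.insert key [gp.1]) lt) lt0
    = (pvPairs gs).foldl (fun d p => d.modify p.1 [] (fun v => v ++ [p.2])) lt0 := by
  rw [pvPairs, List.foldl_flatMap]
  apply PySem.List.foldl_congr_mem
  intro acc gp _
  rw [List.foldl_map]
  apply PySem.List.foldl_congr_mem
  intro lt key _
  cases hc : lt.contains key with
  | true => simp [PySem.Dict.modify]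
  | false =>
    simp [PySem.Dict.modify, PySem.Dict.getD_of_not_contains _ _ hc]

-- updating a set with elements it already has changes nothing
theorem pv_set_update_self {α : Type} [BEq α] (s : PySem.Set α) (l : List α)
    (h : ∀ x ∈ l, List.contains s x = true) : PySem.Set.update s l = s := by
  induction l with
  | nil => rfl
  | cons x t ih =>
    have hx : PySem.Set.add s x = s := by
      simp [PySem.Set.add, PySem.Set.contains, h x (by simp)]
    simp only [PySem.Set.update, List.foldl_cons] at *
    rw [hx, ih (fun y hy => h y (by simp [hy]))]

-- ===== VERDICT (by name: the statement is the Claim_ definition above) =====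
theorem parameter_lookup_dict_spec : Claim_equal_parameter_lookup_dict := by
  intro dct _
  simp only [Spec_parameter_lookup_dict, parameter_lookup_dict, parameter_lookup_dict_alt]
  set d : PySem.Dict String (PySem.Dict String Int) :=
    PySem.Dict.ofList (dct.map (fun p => (p.1, PySem.Dict.ofList p.2))) with hd
  -- B's flattened pair list is the stream of A's double loop over d.items
  have hpairs : (PySem.Dict.ofList dct).items.flatMap (fun gp =>
      (PySem.Dict.ofList gp.2).keys.map (fun key => (key, gp.1))) = pvPairs d.items := by
    rw [hd, pv_ofList_map, pvPairs, List.flatMap_map]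
  rw [hpairs, pv_aloop]
  set ps := pvPairs d.items with hps
  set lt : PySem.Dict String (List String) :=
    ps.foldl (fun d p => d.modify p.1 [] (fun v => v ++ [p.2])) PySem.Dict.empty with hlt
  -- keys of lt = the deduped key stream
  have hkeys : lt.keys = PySem.Set.ofList (ps.map (fun p => p.1)) := by
    rw [hlt, PySem.Dict.keys_foldl_modify_key ps (fun p => p.1) []
      (fun _ p => fun v => v ++ [p.2]) PySem.Dict.empty, PySem.Dict.keys_empty]
    simp [PySem.Set.update, PySem.Set.ofList_eq_foldl]
  have hknd : lt.keys.Nodup := by rw [hkeys]; exact PySem.Set.nodup_ofList _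
  -- lookups in lt = per-key filter of the pair list
  have hget : ∀ k, lt.getD k [] = (ps.filter (fun p => p.1 == k)).map (fun p => p.2) := by
    intro k
    rw [hlt, PySem.Dict.getD_foldl_modify_append, PySem.Dict.getD_empty, List.nil_append]
  -- the final append-key loop
  set r := lt.keys.foldl (fun d key => d.modify key [] (fun v => v ++ [key])) lt with hr
  have hrfold : r = (lt.keys.map (fun k => (k, k))).foldl
      (fun d p => d.modify p.1 [] (fun v => v ++ [p.2])) lt := by
    rw [hr, List.foldl_map]
  have hrkeys : r.keys = lt.keys := by
    rw [hrfold, PySem.Dict.keys_foldl_modify_key (lt.keys.map (fun k => (k, k))) (fun p => p.1) []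
      (fun _ p => fun v => v ++ [p.2]) lt]
    rw [List.map_map]
    have : ((fun p : String × String => p.1) ∘ fun k : String => (k, k)) = id := rfl
    rw [this, List.map_id]
    exact pv_set_update_self _ _ (fun x hx => by simpa using hx)
  have hrknd : r.keys.Nodup := by rw [hrkeys]; exact hknd
  have hrget : ∀ k ∈ lt.keys, r.getD k [] = lt.getD k [] ++ [k] := by
    intro k hk
    rw [hrfold, PySem.Dict.getD_foldl_modify_append, List.filter_map]
    have hcomp : ((fun p : String × String => p.1 == k) ∘ fun k' : String => (k', k'))
        = fun k' => k' == k := rfl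
    rw [hcomp, pv_filter_beq _ _ hknd]
    simp [hk]
  -- assemble
  rw [PySem.Dict.items_eq_map_keys r hrknd [], hrkeys]
  rw [PySem.List.dedup_eq_ofList, ← hkeys]
  apply List.map_congr_left
  intro k hk
  rw [hrget k hk, hget k]
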